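-- pv_equiv track=rewrite | github.com/hhmitchell/adventofcode | 2021/day15part2.py | get_cavern
-- ===== SOURCE A (Python) =====
-- def get_cavern(tile):
--     repeat = 5
--     row = [None for i in range(repeat * len(tile[0]))]
--     cavern = [row.copy() for i in range(repeat * len(tile))]
--     for i in range(len(tile)):
--         cavern[i][0:len(tile[i])] = tile[i]
--     for i in range(1, repeat):
--         for x in range(len(tile)):
--             parent_row = cavern[x + (i - 1) * len(tile)][0:len(tile[x])]
--             cavern[x + (i * len(tile))][0:len(tile[x])] = [
--                 value + 1 if value < 9 else 1 for value in parent_row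
--             ]
--     for i in range(1, repeat):
--         for x in range(len(cavern)):
--             parent_row = cavern[x][(i - 1) * len(tile):i * len(tile)]
--             cavern[x][i * len(tile):(i + 1) * len(tile)] = [
--                 value + 1 if value < 9 else 1 for value in parent_row
--             ]
--     return cavern
-- ===== SOURCE B (Python) =====
-- def get_cavern(tile):
--     size = len(tile)
--
--     def bump(v, k):
--         for _ in range(k):
--             v = v + 1 if v < 9 else 1
--         return v
--
--     return [
--         [bump(tile[r % size][c % size], r // size + c // size) for c in range(5 * size)]
--         for r in range(5 * size)
--     ]
-- ===== Notes on version B (the rewrite author's own statement) =====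
-- stated objective: simpler
-- what changed: Replaces A's allocate-then-two-propagation-passes (a None-filled grid, vertical block copies then horizontal block copies via slice assignment) with a single comprehension computing each output cell directly from the source tile: cell (r,c) is the step `v+1 if v<9 else 1` applied r//size + c//size times to tile[r%size][c%size].
-- outside the precondition, e.g. on get_cavern([[]]): A returns [[], [], [], [], []], B raises IndexError
import Mathlib
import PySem

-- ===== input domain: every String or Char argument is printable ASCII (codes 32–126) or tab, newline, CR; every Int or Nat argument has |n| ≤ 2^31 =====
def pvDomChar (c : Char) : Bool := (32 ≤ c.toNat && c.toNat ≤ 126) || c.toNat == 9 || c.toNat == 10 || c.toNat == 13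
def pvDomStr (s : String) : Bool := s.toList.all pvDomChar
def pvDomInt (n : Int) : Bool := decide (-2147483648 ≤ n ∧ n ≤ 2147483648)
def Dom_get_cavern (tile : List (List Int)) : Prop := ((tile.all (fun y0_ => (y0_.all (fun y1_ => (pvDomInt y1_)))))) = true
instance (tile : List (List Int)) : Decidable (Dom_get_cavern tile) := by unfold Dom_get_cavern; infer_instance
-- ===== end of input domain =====

-- B computes each tiled cell directly from the source tile (one pass) instead of A's
-- vertical-then-horizontal block-propagation over a mutable None-filled grid; same values, one pass.


-- ===== PORT A =====
-- Python slice assignment  xs[a:b] = vs  for nonnegative a, b (exact: clamped cut points, b below a acts as insertion at a)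
def pvSetSlice {α : Type} (xs : List α) (a b : Nat) (vs : List α) : List α :=
  xs.take (min a xs.length) ++ vs ++ xs.drop (max (min a xs.length) (min b xs.length))

-- A's comprehension  [value + 1 if value < 9 else 1 for value in parent_row]
def pvBumpRow (parent_row : List Int) : List Int :=
  parent_row.map (fun value => if value < 9 then value + 1 else 1)

-- Literal port of A.  repeat = 5.  The initial None placeholders are rendered as 0 (on Pre_ every
-- cell is overwritten before being read or returned).  xs[0:k] is xs.take k and xs[a:b] (Nat a ≤ b)
-- is (xs.drop a).take (b - a) by PySem.List.slice_to_natCast / slice_natCast.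
def get_cavern (tile : List (List Int)) : List (List Int) :=
  let n := tile.length
  let row : List Int := List.replicate (5 * (tile.headD []).length) 0
  let cav0 := List.replicate (5 * n) row
  let cav1 := (List.range n).foldl (fun cav i =>
      cav.set i (pvSetSlice (cav.getD i []) 0 (tile.getD i []).length (tile.getD i []))) cav0
  let cav2 := [1, 2, 3, 4].foldl (fun cav i =>
      (List.range n).foldl (fun cav x =>
        cav.set (x + i * n)
          (pvSetSlice (cav.getD (x + i * n) []) 0 (tile.getD x []).length
            (pvBumpRow ((cav.getD (x + (i - 1) * n) []).take (tile.getD x []).length)))) cav) cav1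
  let cav3 := [1, 2, 3, 4].foldl (fun cav i =>
      (List.range cav2.length).foldl (fun cav x =>
        cav.set x
          (pvSetSlice (cav.getD x []) (i * n) ((i + 1) * n)
            (pvBumpRow (((cav.getD x []).drop ((i - 1) * n)).take (i * n - (i - 1) * n))))) cav) cav2
  cav3

-- ===== PORT B =====
-- B's inner loop: apply  v = v + 1 if v < 9 else 1  exactly k times
def pvBump (v : Int) : Nat → Int
  | 0 => v
  | k + 1 => pvBump (if v < 9 then v + 1 else 1) k

-- Literal port of B: one comprehension over output coordinates (size = len(tile)).
def get_cavern_alt (tile : List (List Int)) : List (List Int) :=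
  let size := tile.length
  (List.range (5 * size)).map (fun r =>
    (List.range (5 * size)).map (fun c =>
      pvBump ((tile.getD (r % size) []).getD (c % size) 0) (r / size + c / size)))

-- ===== PRECONDITION & SPEC =====
-- Pre_ excludes the empty tile and tiles that are not square with uniform row length: there A raises
-- (IndexError / TypeError on None) or returns rows still holding None placeholders (no List Int value)
-- or rows of accidental shapes produced by slice-extension.
def Pre_get_cavern (tile : List (List Int)) : Prop :=
  tile ≠ [] ∧ ∀ row ∈ tile, row.length = tile.length
instance (tile : List (List Int)) : Decidable (Pre_get_cavern tile) := by
  unfold Pre_get_cavern; infer_instance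

def pvWitness_get_cavern : List (List Int) := [[1, 8], [9, 2]]

def Spec_get_cavern (tile : List (List Int)) (out : List (List Int)) : Prop := out = get_cavern_alt tile
instance (tile : List (List Int)) (out : List (List Int)) : Decidable (Spec_get_cavern tile out) := by
  unfold Spec_get_cavern; infer_instance

-- ===== CLAIM (what is proved, stated in full; the proofs are below) =====
def Claim_equal_get_cavern : Prop := ∀ (tile : List (List Int)), Dom_get_cavern tile → Pre_get_cavern tile → Spec_get_cavern tile (get_cavern tile)

-- ===== LEMMAS AND PROOFS =====

-- proof-side abbreviations for A's three passes (the lambdas are exactly the port's)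
def F1 (tile : List (List Int)) (m : Nat) : List (List Int) :=
  (List.range m).foldl (fun cav i =>
      cav.set i (pvSetSlice (cav.getD i []) 0 (tile.getD i []).length (tile.getD i [])))
    (List.replicate (5 * tile.length) (List.replicate (5 * (tile.headD []).length) 0))

def G2 (tile : List (List Int)) (i : Nat) (cav : List (List Int)) (m : Nat) : List (List Int) :=
  (List.range m).foldl (fun cav x =>
      cav.set (x + i * tile.length)
        (pvSetSlice (cav.getD (x + i * tile.length) []) 0 (tile.getD x []).length
          (pvBumpRow ((cav.getD (x + (i - 1) * tile.length) []).take (tile.getD x []).length)))) cav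

def G3 (tile : List (List Int)) (i : Nat) (cav : List (List Int)) (m : Nat) : List (List Int) :=
  (List.range m).foldl (fun cav x =>
      cav.set x
        (pvSetSlice (cav.getD x []) (i * tile.length) ((i + 1) * tile.length)
          (pvBumpRow (((cav.getD x []).drop ((i - 1) * tile.length)).take
            (i * tile.length - (i - 1) * tile.length))))) cav

def pvStep (v : Int) : Int := if v < 9 then v + 1 else 1

def pvFill2 (tile : List (List Int)) (j : Nat) : List Int :=
  pvBumpRow^[j / tile.length] (tile.getD (j % tile.length) []) ++ List.replicate (4 * tile.length) 0

def pvRow3 (tile : List (List Int)) (i j : Nat) : List Int :=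
  ((List.range (i + 1)).flatMap
      (fun b => pvBumpRow^[j / tile.length + b] (tile.getD (j % tile.length) []))) ++
    List.replicate ((4 - i) * tile.length) 0

-- one-step unfoldings of the three passes
theorem F1_succ (tile : List (List Int)) (m : Nat) :
    F1 tile (m + 1) = (F1 tile m).set m
      (pvSetSlice ((F1 tile m).getD m []) 0 (tile.getD m []).length (tile.getD m [])) := by
  unfold F1; rw [List.range_succ, List.foldl_append]; rfl

theorem G2_succ (tile : List (List Int)) (i : Nat) (cav : List (List Int)) (m : Nat) :
    G2 tile i cav (m + 1) = (G2 tile i cav m).set (m + i * tile.length)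
      (pvSetSlice ((G2 tile i cav m).getD (m + i * tile.length) []) 0 (tile.getD m []).length
        (pvBumpRow (((G2 tile i cav m).getD (m + (i - 1) * tile.length) []).take
          (tile.getD m []).length))) := by
  unfold G2; rw [List.range_succ, List.foldl_append]; rfl

theorem G3_succ (tile : List (List Int)) (i : Nat) (cav : List (List Int)) (m : Nat) :
    G3 tile i cav (m + 1) = (G3 tile i cav m).set m
      (pvSetSlice ((G3 tile i cav m).getD m []) (i * tile.length) ((i + 1) * tile.length)
        (pvBumpRow ((((G3 tile i cav m).getD m []).drop ((i - 1) * tile.length)).take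
          (i * tile.length - (i - 1) * tile.length)))) := by
  unfold G3; rw [List.range_succ, List.foldl_append]; rfl

-- small facts
theorem getD_replicate' {a : Type} (L j : Nat) (r d : List a) (h : j < L) :
    (List.replicate L r).getD j d = r := by
  rw [List.getD_eq_getElem _ _ (by simpa using h)]; simp

theorem getD_set_self' {a : Type} (l : List (List a)) (i : Nat) (v : List a) (h : i < l.length) :
    (l.set i v).getD i [] = v := by
  simp [List.getD_eq_getElem?_getD, h]

theorem getD_set_ne' {a : Type} (l : List (List a)) (i j : Nat) (v : List a) (h : j ≠ i) :
    (l.set i v).getD j [] = l.getD j [] := by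
  simp [List.getD_eq_getElem?_getD, List.getElem?_set_ne (by omega : i ≠ j)]

theorem bumpRow_eq_map (xs : List Int) : pvBumpRow xs = xs.map pvStep := rfl

theorem iter_len (k : Nat) (xs : List Int) : (pvBumpRow^[k] xs).length = xs.length := by
  induction k generalizing xs with
  | zero => rfl
  | succ k ih => rw [Function.iterate_succ_apply]; rw [ih]; simp [pvBumpRow]

theorem iter_getElem? (k : Nat) (xs : List Int) (c : Nat) :
    (pvBumpRow^[k] xs)[c]? = (xs[c]?).map (pvStep^[k]) := by
  induction k generalizing xs with
  | zero => simp
  | succ k ih =>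
      rw [Function.iterate_succ_apply, ih, bumpRow_eq_map, List.getElem?_map]
      cases xs[c]? <;> simp

theorem bump_eq_iter (v : Int) (k : Nat) : pvBump v k = pvStep^[k] v := by
  induction k generalizing v with
  | zero => rfl
  | succ k ih => rw [pvBump, ih, Function.iterate_succ_apply]; rfl

theorem setSlice_zero_rep (L k : Nat) (vs : List Int) (hk : k ≤ L) :
    pvSetSlice (List.replicate L (0 : Int)) 0 k vs = vs ++ List.replicate (L - k) 0 := by
  unfold pvSetSlice
  simp [List.drop_replicate, hk]

theorem setSlice_blocks (pre blk post newblk : List Int) (n i : Nat)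
    (hpre : pre.length = i * n) (hblk : blk.length = n) :
    pvSetSlice (pre ++ blk ++ post) (i * n) ((i + 1) * n) newblk = pre ++ newblk ++ post := by
  have hmul : (i + 1) * n = i * n + n := by ring
  have hL : (pre ++ blk ++ post).length = i * n + n + post.length := by
    simp [hpre, hblk]; omega
  have htake : (pre ++ blk ++ post).take (i * n) = pre := by
    rw [List.append_assoc]; exact List.take_left' hpre
  have hdrop : (pre ++ blk ++ post).drop (i * n + n) = post := by
    exact List.drop_left' (by simp [hpre, hblk])
  unfold pvSetSlice
  rw [hL, hmul, Nat.min_eq_left (by omega), Nat.min_eq_left (by omega),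
    Nat.max_eq_right (by omega), htake, hdrop]

theorem blocks_length (f : Nat → List Int) (k n : Nat) (hf : ∀ b, b < k → (f b).length = n) :
    ((List.range k).flatMap f).length = k * n := by
  induction k with
  | zero => simp
  | succ k ih =>
      rw [List.range_succ]
      have e : (k + 1) * n = k * n + n := by ring
      simp [List.flatMap_append, ih (fun b hb => hf b (by omega)), hf k (by omega), e]

theorem blocks_getElem? (f : Nat → List Int) (k n : Nat)     (hf : ∀ b, b < k → (f b).length = n) (c : Nat) (hc : c < k * n) :
    ((List.range k).flatMap f)[c]? = (f (c / n))[c % n]? := by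
  suffices H : ∀ kk, (∀ b, b < kk → (f b).length = n) → ∀ c, c < kk * n →
      ((List.range kk).flatMap f)[c]? = (f (c / n))[c % n]? from H k hf c hc
  intro kk
  induction kk with
  | zero => intro _ c hc; omega
  | succ k ih =>
      intro hf c hc
      have hlen : ((List.range k).flatMap f).length = k * n :=
        blocks_length f k n (fun b hb => hf b (by omega))
      rw [List.range_succ, List.flatMap_append]
      simp only [List.flatMap_cons, List.flatMap_nil, List.append_nil]
      by_cases h : c < k * n
      · rw [List.getElem?_append_left (by rw [hlen]; exact h)]
        exact ih (fun b hb => hf b (by omega)) c h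
      · rw [List.getElem?_append_right (by rw [hlen]; omega), hlen]
        have hub : c < (k + 1) * n := hc
        have e : (k + 1) * n = k * n + n := by ring
        have hdiv : c / n = k := Nat.div_eq_of_lt_le (by omega) (by rw [Nat.succ_mul]; omega)
        have hdm := Nat.div_add_mod c n
        rw [hdiv] at hdm
        have ecomm : n * k = k * n := by ring
        have hmod : c % n = c - k * n := by omega
        rw [hdiv, hmod]

theorem row3_zero (tile : List (List Int)) (j : Nat) : pvRow3 tile 0 j = pvFill2 tile j := by
  simp [pvRow3, pvFill2, List.range_one]

-- phase 1: after the initial copy-in pass, rows below m hold the tile rows, the rest are zero rows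
theorem P1 (tile : List (List Int)) (h0 : 0 < tile.length)
    (hw : (tile.headD []).length = tile.length)
    (htl : ∀ m, m < tile.length → (tile.getD m []).length = tile.length)
    (m : Nat) (hm : m ≤ tile.length) :
    (F1 tile m).length = 5 * tile.length ∧
    ∀ j, j < 5 * tile.length → (F1 tile m).getD j [] =
      if j < m then pvFill2 tile j else List.replicate (5 * tile.length) 0 := by
  induction m with
  | zero =>
      refine ⟨by simp [F1], ?_⟩
      intro j hj
      rw [if_neg (by omega)]
      simp only [F1, List.range_zero, List.foldl_nil]
      rw [hw]
      exact getD_replicate' _ j _ _ hj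
  | succ m ih =>
      obtain ⟨ihl, ihg⟩ := ih (by omega)
      have hzrow : (F1 tile m).getD m [] = List.replicate (5 * tile.length) 0 := by
        have h := ihg m (by omega)
        rwa [if_neg (by omega)] at h
      have hval : pvSetSlice ((F1 tile m).getD m []) 0 (tile.getD m []).length (tile.getD m [])
          = pvFill2 tile m := by
        rw [hzrow, htl m (by omega), setSlice_zero_rep _ _ _ (by omega)]
        unfold pvFill2
        rw [Nat.div_eq_of_lt (by omega), Nat.mod_eq_of_lt (by omega)]
        simp only [Function.iterate_zero, id_eq]
        congr 1
        · congr 1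
          omega
      refine ⟨by rw [F1_succ]; simp [ihl], ?_⟩
      intro j hj
      by_cases hjm : j = m
      · subst hjm
        rw [F1_succ, getD_set_self' _ _ _ (by rw [ihl]; omega), hval, if_pos (by omega)]
      · rw [F1_succ, getD_set_ne' _ _ _ _ hjm, ihg j hj]
        by_cases hlt : j < m
        · rw [if_pos hlt, if_pos (by omega)]
        · rw [if_neg hlt, if_neg (by omega)]

-- phase 2, one outer step: block i+1 of rows is filled from block i
theorem P2step (tile : List (List Int)) (h0 : 0 < tile.length)
    (htl : ∀ m, m < tile.length → (tile.getD m []).length = tile.length)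
    (i : Nat) (hi : i ≤ 3) (cav : List (List Int))
    (hl : cav.length = 5 * tile.length)
    (hc : ∀ j, j < 5 * tile.length → cav.getD j [] =
      if j < (i + 1) * tile.length then pvFill2 tile j else List.replicate (5 * tile.length) 0)
    (m : Nat) (hm : m ≤ tile.length) :
    (G2 tile (i + 1) cav m).length = 5 * tile.length ∧
    ∀ j, j < 5 * tile.length → (G2 tile (i + 1) cav m).getD j [] =
      if j < (i + 1) * tile.length + m then pvFill2 tile j
      else List.replicate (5 * tile.length) 0 := by
  have hb3 : i * tile.length ≤ 3 * tile.length := Nat.mul_le_mul_right _ hi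
  have hb4 : (i + 1) * tile.length ≤ 4 * tile.length := Nat.mul_le_mul_right _ (by omega)
  have hmul : (i + 1) * tile.length = i * tile.length + tile.length := by ring
  induction m with
  | zero =>
      refine ⟨by simpa [G2] using hl, ?_⟩
      intro j hj
      rw [Nat.add_zero]
      simpa [G2] using hc j hj
  | succ m ih =>
      obtain ⟨ihl, ihg⟩ := ih (by omega)
      have hstep := G2_succ tile (i + 1) cav m
      simp only [Nat.add_sub_cancel] at hstep
      have hr : (G2 tile (i + 1) cav m).getD (m + i * tile.length) []
          = pvFill2 tile (m + i * tile.length) := by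
        have h := ihg (m + i * tile.length) (by omega)
        rwa [if_pos (by omega)] at h
      have hfr : pvFill2 tile (m + i * tile.length)
          = pvBumpRow^[i] (tile.getD m []) ++ List.replicate (4 * tile.length) 0 := by
        unfold pvFill2
        rw [Nat.add_mul_div_right _ _ h0, Nat.div_eq_of_lt (by omega),
          Nat.add_mul_mod_self_right, Nat.mod_eq_of_lt (by omega)]
        simp
      have htake : ((G2 tile (i + 1) cav m).getD (m + i * tile.length) []).take
          (tile.getD m []).length = pvBumpRow^[i] (tile.getD m []) := by
        rw [hr, hfr, htl m (by omega)]
        exact List.take_left' (by rw [iter_len, htl m (by omega)])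
      have hwrow : (G2 tile (i + 1) cav m).getD (m + (i + 1) * tile.length) []
          = List.replicate (5 * tile.length) 0 := by
        have h := ihg (m + (i + 1) * tile.length) (by omega)
        rwa [if_neg (by omega)] at h
      have hval : pvSetSlice ((G2 tile (i + 1) cav m).getD (m + (i + 1) * tile.length) []) 0
          (tile.getD m []).length (pvBumpRow (pvBumpRow^[i] (tile.getD m [])))
          = pvFill2 tile (m + (i + 1) * tile.length) := by
        rw [hwrow, htl m (by omega), setSlice_zero_rep _ _ _ (by omega)]
        unfold pvFill2
        rw [Nat.add_mul_div_right _ _ h0, Nat.div_eq_of_lt (by omega),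
          Nat.add_mul_mod_self_right, Nat.mod_eq_of_lt (by omega),
          ← Function.iterate_succ_apply' pvBumpRow i]
        simp only [Nat.zero_add]
        congr 1
        · congr 1
          omega
      refine ⟨by rw [hstep]; simp [ihl], ?_⟩
      intro j hj
      by_cases hjw : j = m + (i + 1) * tile.length
      · subst hjw
        rw [hstep, htake, getD_set_self' _ _ _ (by rw [ihl]; omega), hval, if_pos (by omega)]
      · rw [hstep, htake, getD_set_ne' _ _ _ _ hjw, ihg j hj]
        by_cases hlt : j < (i + 1) * tile.length + m
        · rw [if_pos hlt, if_pos (by omega)]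
        · rw [if_neg hlt, if_neg (by omega)]

-- phase 3, one outer step: column block i+1 of every row is filled from column block i
theorem P3step (tile : List (List Int)) (h0 : 0 < tile.length)
    (htl : ∀ m, m < tile.length → (tile.getD m []).length = tile.length)
    (i : Nat) (hi : i ≤ 3) (cav : List (List Int))
    (hl : cav.length = 5 * tile.length)
    (hc : ∀ j, j < 5 * tile.length → cav.getD j [] = pvRow3 tile i j)
    (m : Nat) (hm : m ≤ 5 * tile.length) :
    (G3 tile (i + 1) cav m).length = 5 * tile.length ∧
    ∀ j, j < 5 * tile.length → (G3 tile (i + 1) cav m).getD j [] =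
      if j < m then pvRow3 tile (i + 1) j else pvRow3 tile i j := by
  have hmul : (i + 1) * tile.length = i * tile.length + tile.length := by ring
  induction m with
  | zero =>
      refine ⟨by simpa [G3] using hl, ?_⟩
      intro j hj
      rw [if_neg (by omega)]
      simpa [G3] using hc j hj
  | succ m ih =>
      obtain ⟨ihl, ihg⟩ := ih (by omega)
      have hstep := G3_succ tile (i + 1) cav m
      simp only [Nat.add_sub_cancel] at hstep
      have hrow : (G3 tile (i + 1) cav m).getD m [] = pvRow3 tile i m := by
        have h := ihg m (by omega)
        rwa [if_neg (by omega)] at h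
      have hXlen : (tile.getD (m % tile.length) []).length = tile.length :=
        htl _ (Nat.mod_lt _ h0)
      have hfb : ∀ b, (pvBumpRow^[m / tile.length + b] (tile.getD (m % tile.length) [])).length
          = tile.length := fun b => by rw [iter_len]; exact hXlen
      have hBL1 : ((List.range (i + 1)).flatMap (fun b => pvBumpRow^[m / tile.length + b] (tile.getD (m % tile.length) []))).length = (i + 1) * tile.length :=
        blocks_length _ _ _ (fun b _ => hfb b)
      have hBLi : ((List.range i).flatMap (fun b => pvBumpRow^[m / tile.length + b] (tile.getD (m % tile.length) []))).length = i * tile.length :=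
        blocks_length _ _ _ (fun b _ => hfb b)
      have hrep : List.replicate ((4 - i) * tile.length) (0 : Int)
          = List.replicate tile.length 0 ++ List.replicate ((3 - i) * tile.length) 0 := by
        rw [← List.replicate_add]
        congr 1
        have e : 4 - i = 1 + (3 - i) := by omega
        rw [e]; ring
      have hdecomp : pvRow3 tile i m = ((List.range (i + 1)).flatMap (fun b => pvBumpRow^[m / tile.length + b] (tile.getD (m % tile.length) []))
          ++ List.replicate tile.length 0) ++ List.replicate ((3 - i) * tile.length) 0 := by
        unfold pvRow3
        rw [hrep, ← List.append_assoc]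
      have htk : (i + 1) * tile.length - i * tile.length = tile.length := by omega
      have hflat : (List.range (i + 1)).flatMap (fun b => pvBumpRow^[m / tile.length + b] (tile.getD (m % tile.length) [])) = (List.range i).flatMap (fun b => pvBumpRow^[m / tile.length + b] (tile.getD (m % tile.length) [])) ++ (fun b => pvBumpRow^[m / tile.length + b] (tile.getD (m % tile.length) [])) i := by
        rw [List.range_succ]; simp
      have hread : (((G3 tile (i + 1) cav m).getD m []).drop (i * tile.length)).take
          ((i + 1) * tile.length - i * tile.length) = (fun b => pvBumpRow^[m / tile.length + b] (tile.getD (m % tile.length) [])) i := by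
        rw [hrow, htk]
        unfold pvRow3
        rw [hflat, List.append_assoc, List.drop_left' hBLi]
        exact List.take_left' (hfb i)
      have hbump : pvBumpRow ((fun b => pvBumpRow^[m / tile.length + b] (tile.getD (m % tile.length) [])) i) = (fun b => pvBumpRow^[m / tile.length + b] (tile.getD (m % tile.length) [])) (i + 1) :=
        (Function.iterate_succ_apply' pvBumpRow (m / tile.length + i) _).symm
      have hflat2 : (List.range (i + 1 + 1)).flatMap (fun b => pvBumpRow^[m / tile.length + b] (tile.getD (m % tile.length) []))
          = (List.range (i + 1)).flatMap (fun b => pvBumpRow^[m / tile.length + b] (tile.getD (m % tile.length) [])) ++ (fun b => pvBumpRow^[m / tile.length + b] (tile.getD (m % tile.length) [])) (i + 1) := by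
        rw [List.range_succ]; simp
      have h43 : 4 - (i + 1) = 3 - i := by omega
      have hval : pvSetSlice ((G3 tile (i + 1) cav m).getD m []) ((i + 1) * tile.length)
          ((i + 1 + 1) * tile.length) (pvBumpRow ((fun b => pvBumpRow^[m / tile.length + b] (tile.getD (m % tile.length) [])) i)) = pvRow3 tile (i + 1) m := by
        rw [hrow, hdecomp, setSlice_blocks _ _ _ _ _ _ hBL1 (by simp), hbump]
        unfold pvRow3
        rw [hflat2, h43]
      refine ⟨by rw [hstep]; simp [ihl], ?_⟩
      intro j hj
      by_cases hjm : j = m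
      · subst hjm
        rw [hstep, hread, getD_set_self' _ _ _ (by rw [ihl]; omega), hval, if_pos (by omega)]
      · rw [hstep, hread, getD_set_ne' _ _ _ _ hjm, ihg j hj]
        by_cases hlt : j < m
        · rw [if_pos hlt, if_pos (by omega)]
        · rw [if_neg hlt, if_neg (by omega)]

-- a grid whose rows are pvRow3 tile 4 is exactly B's output
theorem final_eq (tile : List (List Int)) (h0 : 0 < tile.length)
    (htl : ∀ m, m < tile.length → (tile.getD m []).length = tile.length)
    (cav : List (List Int)) (hl : cav.length = 5 * tile.length)
    (hc : ∀ j, j < 5 * tile.length → cav.getD j [] = pvRow3 tile 4 j) :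
    cav = get_cavern_alt tile := by
  have halt : get_cavern_alt tile = (List.range (5 * tile.length)).map (fun r =>
      (List.range (5 * tile.length)).map (fun c =>
        pvBump ((tile.getD (r % tile.length) []).getD (c % tile.length) 0)
          (r / tile.length + c / tile.length))) := by
    simp only [get_cavern_alt]
  rw [halt]
  apply List.ext_getElem
  · rw [hl]; simp
  · intro r h1 h2
    have hr : r < 5 * tile.length := by simpa using h2
    have hrowr := hc r hr
    rw [List.getD_eq_getElem _ _ h1] at hrowr
    rw [hrowr, List.getElem_map, List.getElem_range]
    have hXl : (tile.getD (r % tile.length) []).length = tile.length :=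
      htl _ (Nat.mod_lt _ h0)
    have hfb : ∀ b, b < 5 →
        (pvBumpRow^[r / tile.length + b] (tile.getD (r % tile.length) [])).length
          = tile.length := fun b _ => by rw [iter_len]; exact hXl
    have hr3 : pvRow3 tile 4 r = (List.range 5).flatMap
        (fun b => pvBumpRow^[r / tile.length + b] (tile.getD (r % tile.length) [])) := by
      unfold pvRow3; simp
    rw [hr3]
    apply List.ext_getElem
    · rw [blocks_length _ _ _ hfb]; simp [Nat.mul_comm]
    · intro c hc1 hc2
      have hcn : c < 5 * tile.length := by simpa using hc2
      have hcm : c % tile.length < tile.length := Nat.mod_lt _ h0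
      have hcd : c / tile.length < 5 := Nat.div_lt_of_lt_mul (by omega)
      apply Option.some.inj
      rw [← List.getElem?_eq_getElem, ← List.getElem?_eq_getElem]
      rw [blocks_getElem? _ 5 tile.length hfb c (by omega), iter_getElem?,
        List.getElem?_map, List.getElem?_range hcn,
        List.getElem?_eq_getElem (l := tile.getD (r % tile.length) [])
          (by rw [hXl]; exact hcm)]
      simp only [Option.map_some]
      rw [bump_eq_iter, List.getD_eq_getElem _ _ (show c % tile.length
        < (tile.getD (r % tile.length) []).length by rw [hXl]; exact hcm)]

-- ===== VERDICT (by name: the statement is the Claim_ definition above) =====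
theorem get_cavern_spec : Claim_equal_get_cavern := by
  intro tile _ hpre
  obtain ⟨hne, hrow⟩ := hpre
  have h0 : 0 < tile.length := List.length_pos_iff.mpr hne
  have hw : (tile.headD []).length = tile.length := by
    cases tile with
    | nil => exact absurd rfl hne
    | cons a t => exact hrow a (List.mem_cons_self)
  have htl : ∀ m, m < tile.length → (tile.getD m []).length = tile.length := by
    intro m hm
    rw [List.getD_eq_getElem _ _ hm]
    exact hrow _ (List.getElem_mem hm)
  unfold Spec_get_cavern
  -- phase 1 then the four vertical steps
  have e1 := P1 tile h0 hw htl tile.length le_rfl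
  have q1 := P2step tile h0 htl 0 (by omega) (F1 tile tile.length) e1.1
    (by
      intro j hj
      rw [e1.2 j hj, show (0 + 1) * tile.length = tile.length from by ring])
    tile.length le_rfl
  have q2 := P2step tile h0 htl 1 (by omega) _ q1.1
    (by
      intro j hj
      rw [q1.2 j hj, show (1 + 1) * tile.length = (0 + 1) * tile.length + tile.length from by ring])
    tile.length le_rfl
  have q3 := P2step tile h0 htl 2 (by omega) _ q2.1
    (by
      intro j hj
      rw [q2.2 j hj, show (2 + 1) * tile.length = (1 + 1) * tile.length + tile.length from by ring])
    tile.length le_rfl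
  have q4 := P2step tile h0 htl 3 (by omega) _ q3.1
    (by
      intro j hj
      rw [q3.2 j hj, show (3 + 1) * tile.length = (2 + 1) * tile.length + tile.length from by ring])
    tile.length le_rfl
  -- after the vertical pass every row is pvRow3 tile 0
  have hC2row : ∀ j, j < 5 * tile.length → (G2 tile (3 + 1) (G2 tile (2 + 1) (G2 tile (1 + 1) (G2 tile (0 + 1) (F1 tile tile.length) tile.length) tile.length) tile.length) tile.length).getD j [] = pvRow3 tile 0 j := by
    intro j hj
    have e : (3 + 1) * tile.length + tile.length = 5 * tile.length := by ring
    have hlt : j < (3 + 1) * tile.length + tile.length := by omega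
    rw [q4.2 j hj, if_pos hlt, row3_zero]
  -- the four horizontal steps
  have r1 := P3step tile h0 htl 0 (by omega) _ q4.1 hC2row (5 * tile.length) le_rfl
  have r2 := P3step tile h0 htl 1 (by omega) _ r1.1
    (fun j hj => by rw [r1.2 j hj, if_pos hj]) (5 * tile.length) le_rfl
  have r3 := P3step tile h0 htl 2 (by omega) _ r2.1
    (fun j hj => by rw [r2.2 j hj, if_pos hj]) (5 * tile.length) le_rfl
  have r4 := P3step tile h0 htl 3 (by omega) _ r3.1
    (fun j hj => by rw [r3.2 j hj, if_pos hj]) (5 * tile.length) le_rfl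
  -- A's port is exactly this chain of passes
  have hport : get_cavern tile = G3 tile (3 + 1) (G3 tile (2 + 1) (G3 tile (1 + 1)
      (G3 tile (0 + 1) (G2 tile (3 + 1) (G2 tile (2 + 1) (G2 tile (1 + 1) (G2 tile (0 + 1) (F1 tile tile.length) tile.length) tile.length) tile.length) tile.length) (G2 tile (3 + 1) (G2 tile (2 + 1) (G2 tile (1 + 1) (G2 tile (0 + 1) (F1 tile tile.length) tile.length) tile.length) tile.length) tile.length).length) (G2 tile (3 + 1) (G2 tile (2 + 1) (G2 tile (1 + 1) (G2 tile (0 + 1) (F1 tile tile.length) tile.length) tile.length) tile.length) tile.length).length) (G2 tile (3 + 1) (G2 tile (2 + 1) (G2 tile (1 + 1) (G2 tile (0 + 1) (F1 tile tile.length) tile.length) tile.length) tile.length) tile.length).length) (G2 tile (3 + 1) (G2 tile (2 + 1) (G2 tile (1 + 1) (G2 tile (0 + 1) (F1 tile tile.length) tile.length) tile.length) tile.length) tile.length).length := rfl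
  rw [q4.1] at hport
  rw [hport]
  exact final_eq tile h0 htl _ r4.1 (fun j hj => by rw [r4.2 j hj, if_pos hj])
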